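-- pv_equiv track=rewrite | github.com/zhenzhang93/UNSW | 9021/QUIZ/quiz5.py | myfuc
-- ===== SOURCE A (Python) =====
-- from math import ceil
--
-- def myfuc(encoded_set):
--     res_set = []
--     number = bin(encoded_set)[2:]
--     number_s = str(number)
--     length_number = len(number_s)
--     for i in range(length_number):
--         if (number_s[length_number - 1 - i] == '1'):
--             if (i % 2 == 0):
--                 res_set.append(i // 2)
--             else:
--                 res_set.append(ceil(-i // 2))
--     sort_set = sorted(res_set)
--     return sort_set
-- ===== SOURCE B (Python) =====
-- def myfuc(encoded_set):
--     s = bin(encoded_set)[2:]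
--     nonneg = []
--     neg = []
--     for i, c in enumerate(reversed(s)):
--         if c == '1':
--             if i % 2 == 0:
--                 nonneg.append(i // 2)
--             else:
--                 neg.append(-((i + 1) // 2))
--     return neg[::-1] + nonneg
-- ===== Notes on version B (the rewrite author's own statement) =====
-- stated objective: alternative
-- what changed: Instead of collecting decoded values in bit-scan order and then calling sorted(), B partitions the ascending scan of the reversed bit string into a nonnegative stream (already ascending) and a negative stream (already descending, reversed at the end), so the sorted result is produced by concatenating two monotone lists with no sorting step.
import Mathlib
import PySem

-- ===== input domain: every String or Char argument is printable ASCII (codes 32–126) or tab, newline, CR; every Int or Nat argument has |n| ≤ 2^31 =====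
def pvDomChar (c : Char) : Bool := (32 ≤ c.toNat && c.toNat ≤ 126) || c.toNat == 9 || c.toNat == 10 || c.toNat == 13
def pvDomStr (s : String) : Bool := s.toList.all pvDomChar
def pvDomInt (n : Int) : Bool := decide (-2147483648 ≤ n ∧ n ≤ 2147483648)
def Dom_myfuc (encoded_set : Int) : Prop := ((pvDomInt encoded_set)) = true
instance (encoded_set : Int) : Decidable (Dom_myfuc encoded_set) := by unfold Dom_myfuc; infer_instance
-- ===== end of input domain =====

-- B replaces A's collect-then-sort by partitioning the ascending bit scan into two already
-- monotone streams (negatives, nonnegatives) merged without any call to sorted().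

-- ===== PORT A =====
def myfuc (encoded_set : Int) : List Int :=
  let res_set : List Int := []
  let number : String := PySem.Str.slice (PySem.Int.pyBin encoded_set) (some 2) none
  let number_s : String := number        -- str() applied to a str is the identity
  let length_number : Int := PySem.Str.len number_s
  let res :=
    (PySem.List.pyRange 0 length_number 1).foldl
      (fun acc i =>
        if PySem.Str.pyGet? number_s (length_number - 1 - i) = some '1' then
          (if PySem.Int.mod i 2 = 0 then
            acc ++ [PySem.Int.floordiv i 2]
          else
            acc ++ [PySem.Int.floordiv (-i) 2])  -- ceil(-i // 2): math.ceil of an int is the int itself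
        else acc) res_set
  PySem.List.sorted res (fun x => x) false

-- ===== PORT B =====
def myfuc_alt (encoded_set : Int) : List Int :=
  let s : String := PySem.Str.slice (PySem.Int.pyBin encoded_set) (some 2) none
  let pair :=
    (PySem.List.enumerate s.toList.reverse 0).foldl
      (fun (p : List Int × List Int) ic =>
        if ic.2 = '1' then
          (if PySem.Int.mod ic.1 2 = 0 then
            (p.1, p.2 ++ [PySem.Int.floordiv ic.1 2])
          else
            (p.1 ++ [-(PySem.Int.floordiv (ic.1 + 1) 2)], p.2))
        else p) ([], [])
  pair.1.reverse ++ pair.2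

-- ===== PRECONDITION & SPEC =====
def Spec_myfuc (encoded_set : Int) (out : List Int) : Prop := out = myfuc_alt encoded_set
instance (encoded_set : Int) (out : List Int) : Decidable (Spec_myfuc encoded_set out) := by unfold Spec_myfuc; infer_instance

-- ===== CLAIM (what is proved, stated in full; the proofs are below) =====
def Claim_equal_myfuc : Prop := ∀ (encoded_set : Int), Dom_myfuc encoded_set → Spec_myfuc encoded_set (myfuc encoded_set)

-- ===== LEMMAS AND PROOFS =====

def pvVal (i : Int) : Int :=
  if PySem.Int.mod i 2 = 0 then PySem.Int.floordiv i 2 else PySem.Int.floordiv (-i) 2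

lemma pv_negdiv (i : Int) :
    PySem.Int.floordiv (-i) 2 = -(PySem.Int.floordiv (i + 1) 2) := by
  rw [PySem.Int.floordiv_eq_ediv_of_pos (by omega),
      PySem.Int.floordiv_eq_ediv_of_pos (by omega)]
  omega

lemma pv_filter_split {α : Type} (p q : α → Bool) (l : List α) :
    (l.filter p).Perm
      (l.filter (fun x => p x && !q x) ++ l.filter (fun x => p x && q x)) := by
  induction l with
  | nil => simp
  | cons x t ih =>
    by_cases hp : p x = true
    · by_cases hq : q x = true
      · simpa [hp, hq] using (ih.cons x).trans List.perm_middle.symm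
      · simpa [hp, hq] using ih.cons x
    · simp only [Bool.not_eq_true] at hp
      simpa [hp] using ih

lemma pv_enum_nonneg {α : Type} (r : List α) (ic : Int × α)
    (h : ic ∈ PySem.List.enumerate r 0) : 0 ≤ ic.1 := by
  rw [PySem.List.mem_enumerate_iff] at h
  obtain ⟨k, hk, rfl⟩ := h
  simp

lemma pv_odd_desc {i j : Int} (hij : i < j)
    (hi : ¬ PySem.Int.mod i 2 = 0) (hj : ¬ PySem.Int.mod j 2 = 0) :
    -(PySem.Int.floordiv (j + 1) 2) < -(PySem.Int.floordiv (i + 1) 2) := by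
  rw [PySem.Int.mod_eq_emod_of_pos (by omega)] at hi hj
  rw [PySem.Int.floordiv_eq_ediv_of_pos (by omega),
      PySem.Int.floordiv_eq_ediv_of_pos (by omega)]
  omega

lemma pv_even_asc {i j : Int} (hij : i < j)
    (hi : PySem.Int.mod i 2 = 0) (hj : PySem.Int.mod j 2 = 0) :
    PySem.Int.floordiv i 2 < PySem.Int.floordiv j 2 := by
  rw [PySem.Int.mod_eq_emod_of_pos (by omega)] at hi hj
  rw [PySem.Int.floordiv_eq_ediv_of_pos (by omega),
      PySem.Int.floordiv_eq_ediv_of_pos (by omega)]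
  omega

lemma pv_neg_lt_pos {i j : Int} (h0i : 0 ≤ i) (h0j : 0 ≤ j)
    (hi : ¬ PySem.Int.mod i 2 = 0) :
    -(PySem.Int.floordiv (i + 1) 2) < PySem.Int.floordiv j 2 := by
  rw [PySem.Int.mod_eq_emod_of_pos (by omega)] at hi
  rw [PySem.Int.floordiv_eq_ediv_of_pos (by omega),
      PySem.Int.floordiv_eq_ediv_of_pos (by omega)]
  omega

lemma pv_bstep (p : List Int × List Int) (ic : Int × Char) :
    (if ic.2 = '1' then
       (if PySem.Int.mod ic.1 2 = 0 then
         (p.1, p.2 ++ [PySem.Int.floordiv ic.1 2])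
       else
         (p.1 ++ [-(PySem.Int.floordiv (ic.1 + 1) 2)], p.2))
     else p)
    = (if ic.2 = '1' ∧ ¬ PySem.Int.mod ic.1 2 = 0 then p.1 ++ [-(PySem.Int.floordiv (ic.1 + 1) 2)] else p.1,
       if ic.2 = '1' ∧ PySem.Int.mod ic.1 2 = 0 then p.2 ++ [PySem.Int.floordiv ic.1 2] else p.2) := by
  split_ifs <;> first | rfl | tauto

lemma pv_astep (cs : List Char) (acc : List Int) (i : Int) (h0 : 0 ≤ i) (h1 : i < (cs.length : Int)) :
    (if PySem.List.pyGet? cs ((cs.length : Int) - 1 - i) = some '1' then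
      (if PySem.Int.mod i 2 = 0 then acc ++ [PySem.Int.floordiv i 2]
       else acc ++ [PySem.Int.floordiv (-i) 2])
     else acc)
    = (if PySem.List.pyGetD cs.reverse i ' ' = '1' then acc ++ [pvVal i] else acc) := by
  have hg : PySem.List.pyGet? cs ((cs.length : Int) - 1 - i)
      = some (PySem.List.pyGetD cs.reverse i ' ') := by
    rw [PySem.List.pyGet?_eq_some_getElem cs (by omega) (by omega),
        PySem.List.pyGetD_eq_getElem cs.reverse ' ' (by omega) (by simp; omega)]
    congr 1
    rw [List.getElem_reverse]
    congr 1
    omega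
  rw [hg]
  simp only [Option.some_inj, pvVal]
  split_ifs <;> rfl

lemma pv_main (cs : List Char) :
    PySem.List.sorted
      ((PySem.List.pyRange 0 ((cs.length : Int)) 1).foldl
        (fun acc i =>
          if PySem.List.pyGet? cs ((cs.length : Int) - 1 - i) = some '1' then
            (if PySem.Int.mod i 2 = 0 then acc ++ [PySem.Int.floordiv i 2]
             else acc ++ [PySem.Int.floordiv (-i) 2])
          else acc) [])
      (fun x => x) false
    =
    ((PySem.List.enumerate cs.reverse 0).foldl
        (fun (p : List Int × List Int) ic =>
          if ic.2 = '1' then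
            (if PySem.Int.mod ic.1 2 = 0 then
              (p.1, p.2 ++ [PySem.Int.floordiv ic.1 2])
            else
              (p.1 ++ [-(PySem.Int.floordiv (ic.1 + 1) 2)], p.2))
          else p) ([], [])).1.reverse ++
    ((PySem.List.enumerate cs.reverse 0).foldl
        (fun (p : List Int × List Int) ic =>
          if ic.2 = '1' then
            (if PySem.Int.mod ic.1 2 = 0 then
              (p.1, p.2 ++ [PySem.Int.floordiv ic.1 2])
            else
              (p.1 ++ [-(PySem.Int.floordiv (ic.1 + 1) 2)], p.2))
          else p) ([], [])).2 := by
  have henum : PySem.List.enumerate cs.reverse 0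
      = (PySem.List.pyRange 0 ((cs.length : Int)) 1).map
          (fun j => (j, PySem.List.pyGetD cs.reverse j ' ')) := by
    have h := PySem.List.enumerate_eq_map_pyRange cs.reverse ' '
    simpa only [PySem.List.len_eq, List.length_reverse] using h
  -- A's loop collects pvVal over the set positions, scanning the reversed string
  have hA : (PySem.List.pyRange 0 ((cs.length : Int)) 1).foldl
      (fun acc i =>
        if PySem.List.pyGet? cs ((cs.length : Int) - 1 - i) = some '1' then
          (if PySem.Int.mod i 2 = 0 then acc ++ [PySem.Int.floordiv i 2]
           else acc ++ [PySem.Int.floordiv (-i) 2])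
        else acc) []
      = ((PySem.List.enumerate cs.reverse 0).filter
          (fun ic => decide (ic.2 = '1'))).map (fun ic => pvVal ic.1) := by
    have e1 : (PySem.List.pyRange 0 ((cs.length : Int)) 1).foldl
        (fun acc i =>
          if PySem.List.pyGet? cs ((cs.length : Int) - 1 - i) = some '1' then
            (if PySem.Int.mod i 2 = 0 then acc ++ [PySem.Int.floordiv i 2]
             else acc ++ [PySem.Int.floordiv (-i) 2])
          else acc) []
        = (PySem.List.pyRange 0 ((cs.length : Int)) 1).foldl
            (fun acc i => if PySem.List.pyGetD cs.reverse i ' ' = '1' then acc ++ [pvVal i] else acc) [] :=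
      PySem.List.foldl_congr_mem _ _ _ _
        (fun acc i hi => pv_astep cs acc i
          (PySem.List.mem_pyRange_one.mp hi).1
          (by simpa using (PySem.List.mem_pyRange_one.mp hi).2))
    have e2 : (PySem.List.pyRange 0 ((cs.length : Int)) 1).foldl
        (fun acc i => if PySem.List.pyGetD cs.reverse i ' ' = '1' then acc ++ [pvVal i] else acc) []
        = ((PySem.List.pyRange 0 ((cs.length : Int)) 1).map
            (fun j => (j, PySem.List.pyGetD cs.reverse j ' '))).foldl
            (fun acc (ic : Int × Char) => if ic.2 = '1' then acc ++ [pvVal ic.1] else acc) [] :=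
      (List.foldl_map (f := fun j : Int => (j, PySem.List.pyGetD cs.reverse j ' '))
        (g := fun acc (ic : Int × Char) => if ic.2 = '1' then acc ++ [pvVal ic.1] else acc)).symm
    have e3 : (PySem.List.enumerate cs.reverse 0).foldl
        (fun acc (ic : Int × Char) => if ic.2 = '1' then acc ++ [pvVal ic.1] else acc) []
        = [] ++ ((PySem.List.enumerate cs.reverse 0).filter
            (fun ic => decide (ic.2 = '1'))).map (fun ic => pvVal ic.1) :=
      PySem.List.foldl_append_ite _ _ _ _
    rw [e1, e2, ← henum, e3, List.nil_append]
  -- B's loop is two independent filtered collections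
  have hB : (PySem.List.enumerate cs.reverse 0).foldl
      (fun (p : List Int × List Int) ic =>
        if ic.2 = '1' then
          (if PySem.Int.mod ic.1 2 = 0 then
            (p.1, p.2 ++ [PySem.Int.floordiv ic.1 2])
          else
            (p.1 ++ [-(PySem.Int.floordiv (ic.1 + 1) 2)], p.2))
        else p) ([], [])
      = (((PySem.List.enumerate cs.reverse 0).filter
            (fun ic => decide (ic.2 = '1' ∧ ¬ PySem.Int.mod ic.1 2 = 0))).map
            (fun ic => -(PySem.Int.floordiv (ic.1 + 1) 2)),
         ((PySem.List.enumerate cs.reverse 0).filter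
            (fun ic => decide (ic.2 = '1' ∧ PySem.Int.mod ic.1 2 = 0))).map
            (fun ic => PySem.Int.floordiv ic.1 2)) := by
    rw [PySem.List.foldl_congr_mem _ _ _ _ (fun acc x _ => pv_bstep acc x)]
    rw [PySem.List.foldl_prod_mk
      (f := fun a (ic : Int × Char) => if ic.2 = '1' ∧ ¬ PySem.Int.mod ic.1 2 = 0 then a ++ [-(PySem.Int.floordiv (ic.1 + 1) 2)] else a)
      (g := fun a (ic : Int × Char) => if ic.2 = '1' ∧ PySem.Int.mod ic.1 2 = 0 then a ++ [PySem.Int.floordiv ic.1 2] else a)]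
    rw [PySem.List.foldl_append_ite, PySem.List.foldl_append_ite]
    simp
  rw [hA, hB]
  dsimp only
  simp only [Bool.decide_and, decide_not]
  have hnegs : ((PySem.List.enumerate cs.reverse 0).filter
      (fun ic => decide (ic.2 = '1') && !decide (PySem.Int.mod ic.1 2 = 0))).map
      (fun ic => -(PySem.Int.floordiv (ic.1 + 1) 2))
      = ((PySem.List.enumerate cs.reverse 0).filter
      (fun ic => decide (ic.2 = '1') && !decide (PySem.Int.mod ic.1 2 = 0))).map
      (fun ic => pvVal ic.1) := by
    apply List.map_congr_left
    intro a ha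
    have hm := (List.mem_filter.mp ha).2
    simp only [Bool.and_eq_true, Bool.not_eq_true', decide_eq_true_eq, decide_eq_false_iff_not] at hm
    simp only [pvVal, if_neg hm.2]
    exact (pv_negdiv a.1).symm
  have hposs : ((PySem.List.enumerate cs.reverse 0).filter
      (fun ic => decide (ic.2 = '1') && decide (PySem.Int.mod ic.1 2 = 0))).map
      (fun ic => PySem.Int.floordiv ic.1 2)
      = ((PySem.List.enumerate cs.reverse 0).filter
      (fun ic => decide (ic.2 = '1') && decide (PySem.Int.mod ic.1 2 = 0))).map
      (fun ic => pvVal ic.1) := by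
    apply List.map_congr_left
    intro a ha
    have hm := (List.mem_filter.mp ha).2
    simp only [Bool.and_eq_true, decide_eq_true_eq] at hm
    simp only [pvVal, if_pos hm.2]
  rw [hnegs, hposs]
  apply PySem.List.sorted_eq_of_perm_of_pairwise_lt
  · refine ((List.reverse_perm _).append_right _).trans ?_
    rw [← List.map_append]
    exact ((pv_filter_split (fun ic : Int × Char => decide (ic.2 = '1'))
        (fun ic => decide (PySem.Int.mod ic.1 2 = 0)) (PySem.List.enumerate cs.reverse 0)).map
        (fun ic => pvVal ic.1)).symm
  · rw [List.pairwise_append]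
    refine ⟨?_, ?_, ?_⟩
    · rw [List.pairwise_reverse, List.pairwise_map]
      refine ((PySem.List.pairwise_lt_enumerate cs.reverse 0).filter _).imp_of_mem ?_
      intro a b ha hb hab
      have ha' := (List.mem_filter.mp ha).2
      have hb' := (List.mem_filter.mp hb).2
      simp only [Bool.and_eq_true, Bool.not_eq_true', decide_eq_true_eq,
        decide_eq_false_iff_not] at ha' hb'
      simp only [pvVal, if_neg ha'.2, if_neg hb'.2]
      rw [pv_negdiv, pv_negdiv]
      exact pv_odd_desc hab ha'.2 hb'.2
    · rw [List.pairwise_map]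
      refine ((PySem.List.pairwise_lt_enumerate cs.reverse 0).filter _).imp_of_mem ?_
      intro a b ha hb hab
      have ha' := (List.mem_filter.mp ha).2
      have hb' := (List.mem_filter.mp hb).2
      simp only [Bool.and_eq_true, decide_eq_true_eq] at ha' hb'
      simp only [pvVal, if_pos ha'.2, if_pos hb'.2]
      exact pv_even_asc hab ha'.2 hb'.2
    · intro a ha b hb
      rw [List.mem_reverse] at ha
      obtain ⟨ia, hia, rfl⟩ := List.mem_map.mp ha
      obtain ⟨ib, hib, rfl⟩ := List.mem_map.mp hb
      have hia' := (List.mem_filter.mp hia).2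
      have hib' := (List.mem_filter.mp hib).2
      simp only [Bool.and_eq_true, Bool.not_eq_true', decide_eq_true_eq,
        decide_eq_false_iff_not] at hia'
      simp only [Bool.and_eq_true, decide_eq_true_eq] at hib'
      simp only [pvVal, if_neg hia'.2, if_pos hib'.2]
      rw [pv_negdiv]
      exact pv_neg_lt_pos (pv_enum_nonneg _ _ (List.mem_of_mem_filter hia))
        (pv_enum_nonneg _ _ (List.mem_of_mem_filter hib)) hia'.2

-- ===== VERDICT (by name: the statement is the Claim_ definition above) =====
theorem myfuc_spec : Claim_equal_myfuc := by
  intro n _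
  unfold Spec_myfuc myfuc myfuc_alt
  simp only [PySem.Str.len_eq, PySem.Str.pyGet?_eq]
  exact pv_main (PySem.Str.slice (PySem.Int.pyBin n) (some 2) none).toList
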